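-- pv_equiv track=rewrite | github.com/nicholas-maltbie/gddoc2yml | src/gddoc2yml/gdxml_helpers.py | is_in_tagset
-- ===== SOURCE A (Python) =====
-- from typing import List, Dict, TextIO, Tuple, Optional, Union
--
-- def is_in_tagset(tag_text: str, tagset: List[str]) -> bool:
--     for tag in tagset:
--         # Complete match.
--         if tag_text == tag:
--             return True
--         # Tag with arguments.
--         if tag_text.startswith(tag + " "):
--             return True
--         # Tag with arguments, special case for [url], [color], and [font].
--         if tag_text.startswith(tag + "="):
--             return True
--
--     return False
-- ===== SOURCE B (Python) =====
-- def is_in_tagset(tag_text, tagset):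
--     s = set(tagset)
--     if tag_text in s:
--         return True
--     for i, c in enumerate(tag_text):
--         if c == ' ' or c == '=':
--             if tag_text[:i] in s:
--                 return True
--     return False
-- ===== Notes on version B (the rewrite author's own statement) =====
-- stated objective: faster
-- what changed: Instead of scanning tagset and testing three startswith variants per tag, B builds a hash set of tagset once and checks tag_text itself plus the prefix before every ' '/'=' position for membership.
import Mathlib
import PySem

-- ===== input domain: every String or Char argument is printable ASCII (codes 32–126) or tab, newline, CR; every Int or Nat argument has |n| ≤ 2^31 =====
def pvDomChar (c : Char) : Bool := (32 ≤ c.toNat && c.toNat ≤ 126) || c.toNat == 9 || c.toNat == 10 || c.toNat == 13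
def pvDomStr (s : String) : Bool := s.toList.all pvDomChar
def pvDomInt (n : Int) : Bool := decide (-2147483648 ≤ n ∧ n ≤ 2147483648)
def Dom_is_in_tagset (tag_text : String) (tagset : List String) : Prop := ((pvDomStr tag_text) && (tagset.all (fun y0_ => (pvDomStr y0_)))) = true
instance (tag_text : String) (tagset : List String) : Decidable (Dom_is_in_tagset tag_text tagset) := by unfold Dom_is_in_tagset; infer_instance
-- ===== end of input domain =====

-- B replaces A's scan of tagset (three startswith tests per tag) by one membership set and a
-- check of tag_text and of each prefix ending at a ' '/'=' position (objective: faster).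

-- ===== PORT A =====
-- the loop over tagset; '==', 'startswith(tag + " ")', 'startswith(tag + "=")' in order
-- (string concatenation and startswith done on List Char via PySem.Chars.startswith, exact)
def is_in_tagset_go (tag_text : String) : List String → Bool
  | [] => false
  | tag :: rest =>
    if tag_text == tag then true
    else if PySem.Chars.startswith tag_text.toList (tag.toList ++ [' ']) then true
    else if PySem.Chars.startswith tag_text.toList (tag.toList ++ ['=']) then true
    else is_in_tagset_go tag_text rest

def is_in_tagset (tag_text : String) (tagset : List String) : Bool :=
  is_in_tagset_go tag_text tagset

-- ===== PORT B =====
-- s = set(tagset); 'tag_text in s'; then for i, c in enumerate(tag_text): if c is ' ' or '='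
-- check tag_text[:i] in s (the early-returning loop is List.any; tag_text[:i] with 0 ≤ i is take)
def is_in_tagset_alt (tag_text : String) (tagset : List String) : Bool :=
  let s : PySem.Set String := PySem.Set.ofList tagset
  if PySem.Set.contains s tag_text then true
  else
    (PySem.List.enumerate tag_text.toList).any (fun ic =>
      (ic.2 == ' ' || ic.2 == '=') &&
        PySem.Set.contains s (String.ofList (tag_text.toList.take ic.1.toNat)))

-- ===== PRECONDITION & SPEC =====
def Spec_is_in_tagset (tag_text : String) (tagset : List String) (out : Bool) : Prop := out = is_in_tagset_alt tag_text tagset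
instance (tag_text : String) (tagset : List String) (out : Bool) : Decidable (Spec_is_in_tagset tag_text tagset out) := by unfold Spec_is_in_tagset; infer_instance

-- ===== CLAIM (what is proved, stated in full; the proofs are below) =====
def Claim_equal_is_in_tagset : Prop := ∀ (tag_text : String) (tagset : List String), Dom_is_in_tagset tag_text tagset → Spec_is_in_tagset tag_text tagset (is_in_tagset tag_text tagset)

-- ===== LEMMAS AND PROOFS =====

-- A's loop is an 'any' over tagset
theorem is_in_tagset_go_eq_any (tag_text : String) (tagset : List String) :
    is_in_tagset_go tag_text tagset =
      tagset.any (fun tag =>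
        (tag_text == tag) ||
        PySem.Chars.startswith tag_text.toList (tag.toList ++ [' ']) ||
        PySem.Chars.startswith tag_text.toList (tag.toList ++ ['='])) := by
  induction tagset with
  | nil => rfl
  | cons tag rest ih =>
    simp only [is_in_tagset_go, List.any_cons, ih]
    by_cases h1 : tag_text == tag <;> by_cases h2 : PySem.Chars.startswith tag_text.toList (tag.toList ++ [' ']) <;>
      by_cases h3 : PySem.Chars.startswith tag_text.toList (tag.toList ++ ['=']) <;>
      simp [h1, h2, h3]

-- membership in PySem.List.enumerate, by position
theorem mem_enumerate_iff {α : Type} {l : List α} {s : Int} {p : Int × α} :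
    p ∈ PySem.List.enumerate l s ↔ ∃ n : Nat, ∃ h : n < l.length, p.1 = s + n ∧ p.2 = l[n] := by
  induction l generalizing s with
  | nil => simp [PySem.List.enumerate_nil]
  | cons x xs ih =>
    rw [PySem.List.enumerate_cons]
    constructor
    · intro h
      rcases List.mem_cons.mp h with h | h
      · exact ⟨0, by simp, by simp [h]⟩
      · rcases (ih (s := s + 1)).mp h with ⟨n, hn, h1, h2⟩
        exact ⟨n + 1, by simpa using hn, by rw [h1]; push_cast; ring, by simpa using h2⟩
    · rintro ⟨n, hn, h1, h2⟩
      cases n with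
      | zero =>
        have hp : p = (s, x) := Prod.ext (by simpa using h1) (by simpa using h2)
        simp [hp]
      | succ m =>
        refine List.mem_cons.mpr (Or.inr ((ih (s := s + 1)).mpr
          ⟨m, Nat.succ_lt_succ_iff.mp (by simpa using hn), ?_, by simpa using h2⟩))
        rw [h1]; push_cast; ring

-- '(t ++ [c]) is a prefix of l' unpacked at the split position
theorem append_singleton_prefix_iff {t l : List Char} {c : Char} :
    (t ++ [c]) <+: l ↔ ∃ h : t.length < l.length, l[t.length] = c ∧ l.take t.length = t := by
  constructor
  · intro h
    have hlen : t.length + 1 ≤ l.length := by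
      have := h.length_le; simpa using this
    have htake := List.prefix_iff_eq_take.mp h
    have hsucc : l.take (t.length + 1) = l.take t.length ++ [l[t.length]'(by omega)] := by
      rw [List.take_add_one]
      simp [List.getElem?_eq_getElem (by omega : t.length < l.length)]
    rw [show (t ++ [c]).length = t.length + 1 by simp, hsucc] at htake
    have h2 := List.append_inj' htake.symm rfl
    refine ⟨by omega, ?_, h2.1⟩
    simpa using h2.2
  · rintro ⟨hlt, hc, ht⟩
    rw [List.prefix_iff_eq_take]
    rw [show (t ++ [c]).length = t.length + 1 by simp, List.take_add_one,
      List.getElem?_eq_getElem hlt, hc, ht]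
    rfl

-- the two programs agree (no Dom hypothesis needed)
theorem is_in_tagset_eq_alt (tag_text : String) (tagset : List String) :
    is_in_tagset tag_text tagset = is_in_tagset_alt tag_text tagset := by
  rw [Bool.eq_iff_iff]
  have hmem : ∀ u : String, PySem.Set.contains (PySem.Set.ofList tagset) u = true ↔ u ∈ tagset := by
    intro u
    rw [PySem.Set.contains_iff, PySem.Set.mem_ofList]
  constructor
  · intro hA
    rw [is_in_tagset, is_in_tagset_go_eq_any, List.any_eq_true] at hA
    rcases hA with ⟨tag, htag, hp⟩
    simp only [Bool.or_eq_true, beq_iff_eq, PySem.Chars.startswith_iff] at hp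
    simp only [is_in_tagset_alt]
    rcases hp with (h | h) | h
    · rw [if_pos ((hmem tag_text).mpr (h ▸ htag))]
    · rcases append_singleton_prefix_iff.mp h with ⟨hlt, hc, ht⟩
      split
      · rfl
      · rw [List.any_eq_true]
        refine ⟨((tag.toList.length : Int), tag_text.toList[tag.toList.length]), mem_enumerate_iff.mpr ⟨tag.toList.length, hlt, by simp, rfl⟩, ?_⟩
        simp only [Bool.and_eq_true, Bool.or_eq_true, beq_iff_eq]
        refine ⟨Or.inl hc, ?_⟩
        rw [hmem]
        have : String.ofList (tag_text.toList.take (Int.toNat (tag.toList.length : Int))) = tag := by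
          rw [Int.toNat_natCast, ht]; simp
        rw [this]; exact htag
    · rcases append_singleton_prefix_iff.mp h with ⟨hlt, hc, ht⟩
      split
      · rfl
      · rw [List.any_eq_true]
        refine ⟨((tag.toList.length : Int), tag_text.toList[tag.toList.length]), mem_enumerate_iff.mpr ⟨tag.toList.length, hlt, by simp, rfl⟩, ?_⟩
        simp only [Bool.and_eq_true, Bool.or_eq_true, beq_iff_eq]
        refine ⟨Or.inr hc, ?_⟩
        rw [hmem]
        have : String.ofList (tag_text.toList.take (Int.toNat (tag.toList.length : Int))) = tag := by
          rw [Int.toNat_natCast, ht]; simp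
        rw [this]; exact htag
  · intro hB
    simp only [is_in_tagset_alt] at hB
    rw [is_in_tagset, is_in_tagset_go_eq_any, List.any_eq_true]
    split at hB
    · next hin =>
      exact ⟨tag_text, (hmem tag_text).mp hin, by simp⟩
    · rw [List.any_eq_true] at hB
      rcases hB with ⟨ic, hic, hp⟩
      rcases mem_enumerate_iff.mp hic with ⟨n, hn, h1, h2⟩
      simp only [Bool.and_eq_true, Bool.or_eq_true, beq_iff_eq] at hp
      rcases hp with ⟨hc, hs⟩
      rw [h1] at hs
      have hnn : (Int.toNat ((0 : Int) + n)) = n := by simp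
      rw [hnn] at hs
      rw [hmem] at hs
      refine ⟨String.ofList (tag_text.toList.take n), hs, ?_⟩
      have htl : (tag_text.toList.take n).length = n := by rw [List.length_take]; exact Nat.min_eq_left hn.le
      have hpre : (tag_text.toList.take n ++ [tag_text.toList[n]]) <+: tag_text.toList := by
        apply append_singleton_prefix_iff.mpr
        refine ⟨by rw [htl]; exact hn, by simp [htl], by rw [htl]⟩
      rcases hc with hc | hc
      · rw [h2] at hc
        rw [hc] at hpre
        simp [PySem.Chars.startswith_iff, hpre]
      · rw [h2] at hc
        rw [hc] at hpre
        simp [PySem.Chars.startswith_iff, hpre]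

-- ===== VERDICT (by name: the statement is the Claim_ definition above) =====
theorem is_in_tagset_spec : Claim_equal_is_in_tagset := by
  intro tag_text tagset _
  exact is_in_tagset_eq_alt tag_text tagset
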